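-- pv_equiv track=rewrite | github.com/KimDoYoung/python25 | rpa/kavana/lib/core/command_preprocessor.py | get_leading_space_info
-- ===== SOURCE A (Python) =====
-- def get_leading_space_info(line):
--     """
--     탭을 변환하면서 실제 앞쪽 공백 개수 및 시작 컬럼 위치 반환
--     - 탭(`\t`)은 공백 4개로 변환
--     """
--     column_position = 1  # 실제 시작 컬럼 위치
--
--     for char in line:
--         if char == "\t":
--             tab_size = 4 - ((column_position - 1) % 4)  # 현재 위치에서 4의 배수가 되도록 설정
--             column_position += tab_size
--         elif char == " ":
--             column_position += 1
--         else:
--             break  # 처음 공백이 끝나면 종료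
--
--     return  column_position  # **정확한 시작 컬럼 번호를 반환**
-- ===== SOURCE B (Python) =====
-- def get_leading_space_info(line):
--     prefix = line[:len(line) - len(line.lstrip(" \t"))]
--     return len(prefix.expandtabs(4)) + 1
-- ===== Notes on version B (the rewrite author's own statement) =====
-- stated objective: idiomatic
-- what changed: Replaces the running-column loop with break by slicing off the leading space/tab prefix (via lstrip) and letting str.expandtabs(4) do the 4-stop tab expansion, returning its length + 1.
import Mathlib
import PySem

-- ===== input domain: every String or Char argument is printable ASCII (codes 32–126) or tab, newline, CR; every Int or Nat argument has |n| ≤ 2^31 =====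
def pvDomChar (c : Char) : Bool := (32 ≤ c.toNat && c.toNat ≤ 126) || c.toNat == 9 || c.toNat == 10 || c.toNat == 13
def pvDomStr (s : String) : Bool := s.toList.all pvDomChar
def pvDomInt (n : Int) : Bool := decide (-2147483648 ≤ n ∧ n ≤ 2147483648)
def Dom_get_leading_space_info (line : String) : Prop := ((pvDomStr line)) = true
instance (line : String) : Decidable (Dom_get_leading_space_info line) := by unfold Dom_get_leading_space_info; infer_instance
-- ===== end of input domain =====

-- B replaces A's running-column loop with extract-the-space/tab-prefix then expandtabs(4); return length + 1 (idiomatic, same cost).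

-- ===== PORT A =====
-- the for-loop with break: column_position starts at 1
def pvALoop : List Char → Int → Int
  | [], col => col
  | c :: rest, col =>
    if c = '\t' then pvALoop rest (col + (4 - PySem.Int.mod (col - 1) 4))
    else if c = ' ' then pvALoop rest (col + 1)
    else col

def get_leading_space_info (line : String) : Int := pvALoop line.toList 1

-- ===== PORT B =====
-- str.expandtabs(4); exact here because it is only applied to a prefix of spaces/tabs
-- (no '\n'/'\r', on which Python's expandtabs would reset the column)
def pvExpandTabs4 : List Char → Nat → List Char
  | [], _ => []
  | c :: rest, col =>
    if c = '\t' then List.replicate (4 - col % 4) ' ' ++ pvExpandTabs4 rest (col + (4 - col % 4))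
    else c :: pvExpandTabs4 rest (col + 1)

def get_leading_space_info_alt (line : String) : Int :=
  let cs := line.toList
  -- line.lstrip(" \t")
  let stripped := cs.dropWhile (fun c => c == ' ' || c == '\t')
  -- line[:len(line) - len(stripped)]
  let pre := cs.take (cs.length - stripped.length)
  ((pvExpandTabs4 pre 0).length : Int) + 1

-- ===== PRECONDITION & SPEC =====
def Spec_get_leading_space_info (line : String) (out : Int) : Prop := out = get_leading_space_info_alt line
instance (line : String) (out : Int) : Decidable (Spec_get_leading_space_info line out) := by unfold Spec_get_leading_space_info; infer_instance

-- ===== CLAIM (what is proved, stated in full; the proofs are below) =====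
def Claim_equal_get_leading_space_info : Prop := ∀ (line : String), Dom_get_leading_space_info line → Spec_get_leading_space_info line (get_leading_space_info line)

-- ===== LEMMAS AND PROOFS =====

theorem pv_take_sub_dropWhile (p : Char → Bool) (cs : List Char) :
    cs.take (cs.length - (cs.dropWhile p).length) = cs.takeWhile p := by
  induction cs with
  | nil => simp
  | cons c rest ih =>
    by_cases h : p c
    · have hle : (rest.dropWhile p).length ≤ rest.length := List.length_dropWhile_le p rest
      simp [List.dropWhile, List.takeWhile, h]
      rw [show rest.length + 1 - (rest.dropWhile p).length
            = (rest.length - (rest.dropWhile p).length) + 1 by omega]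
      simp [List.take, ih]
    · simp [List.dropWhile, List.takeWhile, h]

theorem pv_loop_eq_expand (cs : List Char) (n : Nat) :
    pvALoop cs ((n : Int) + 1)
      = ((pvExpandTabs4 (cs.takeWhile (fun c => c == ' ' || c == '\t')) n).length : Int) + n + 1 := by
  induction cs generalizing n with
  | nil => simp [pvALoop, pvExpandTabs4]
  | cons c rest ih =>
    by_cases ht : c = '\t'
    · have hmod : PySem.Int.mod ((n : Int) + 1 - 1) 4 = ((n % 4 : Nat) : Int) := by
        rw [show ((n : Int) + 1 - 1) = (n : Int) by ring]
        exact_mod_cast PySem.Int.mod_natCast n 4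
      have hlt : n % 4 < 4 := Nat.mod_lt _ (by omega)
      have harg : (n : Int) + 1 + (4 - ((n % 4 : Nat) : Int))
          = ((n + (4 - n % 4) : Nat) : Int) + 1 := by push_cast [Nat.sub_add_cancel]; omega
      simp only [pvALoop, ht, hmod, harg]
      rw [ih (n + (4 - n % 4))]
      simp only [List.takeWhile]
      simp [pvExpandTabs4]
      omega
    · by_cases hs : c = ' '
      · simp only [pvALoop, hs]
        rw [show (n : Int) + 1 + 1 = ((n + 1 : Nat) : Int) + 1 by push_cast; ring]
        rw [ih (n + 1)]
        simp only [List.takeWhile]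
        simp [pvExpandTabs4]
        omega
      · have : ¬ (c == ' ' || c == '\t') = true := by simp [ht, hs]
        simp [pvALoop, ht, hs, List.takeWhile, this, pvExpandTabs4]

-- ===== VERDICT (by name: the statement is the Claim_ definition above) =====
theorem get_leading_space_info_spec : Claim_equal_get_leading_space_info := by
  intro line _
  unfold Spec_get_leading_space_info get_leading_space_info get_leading_space_info_alt
  simp only [pv_take_sub_dropWhile]
  have := pv_loop_eq_expand line.toList 0
  simpa using this
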